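-- pv_equiv track=rewrite | github.com/Fear-Hungry/Scientific-Image-Forgery-Detection | notebooks/fase_04_inferencia_submissao_kaggle.py | _tile_coords
-- ===== SOURCE A (Python) =====
-- def _tile_coords(length: int, tile_size: int, overlap: int) -> list[tuple[int, int]]:
--     stride = int(tile_size) - int(overlap)
--     if stride <= 0:
--         raise ValueError("tile_size must be larger than overlap")
--     if length <= tile_size:
--         return [(0, tile_size)]
--     coords = list(range(0, length - tile_size + 1, stride))
--     if coords[-1] != length - tile_size:
--         coords.append(length - tile_size)
--     return [(int(start), int(start + tile_size)) for start in coords]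
-- ===== SOURCE B (Python) =====
-- def _tile_coords(length: int, tile_size: int, overlap: int) -> list[tuple[int, int]]:
--     stride = int(tile_size) - int(overlap)
--     if stride <= 0:
--         raise ValueError("tile_size must be larger than overlap")
--     if length <= tile_size:
--         return [(0, tile_size)]
--     # Build the tiles back-to-front: start from the final (boundary) tile, then
--     # walk down from the largest stride-multiple strictly below the boundary.
--     out = [(length - tile_size, length)]
--     start = (length - tile_size - 1) // stride * stride
--     while start >= 0:
--         out.append((start, start + tile_size))
--         start -= stride
--     out.reverse()
--     return out
-- ===== Notes on version B (the rewrite author's own statement) =====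
-- stated objective: alternative
-- what changed: B builds the tile list back-to-front: it emits the clamped boundary tile first, then walks starts downward by stride from the largest stride-multiple strictly below the boundary, and reverses at the end, instead of materialising an ascending range list, inspecting its last element and conditionally appending the boundary tile.
import Mathlib
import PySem

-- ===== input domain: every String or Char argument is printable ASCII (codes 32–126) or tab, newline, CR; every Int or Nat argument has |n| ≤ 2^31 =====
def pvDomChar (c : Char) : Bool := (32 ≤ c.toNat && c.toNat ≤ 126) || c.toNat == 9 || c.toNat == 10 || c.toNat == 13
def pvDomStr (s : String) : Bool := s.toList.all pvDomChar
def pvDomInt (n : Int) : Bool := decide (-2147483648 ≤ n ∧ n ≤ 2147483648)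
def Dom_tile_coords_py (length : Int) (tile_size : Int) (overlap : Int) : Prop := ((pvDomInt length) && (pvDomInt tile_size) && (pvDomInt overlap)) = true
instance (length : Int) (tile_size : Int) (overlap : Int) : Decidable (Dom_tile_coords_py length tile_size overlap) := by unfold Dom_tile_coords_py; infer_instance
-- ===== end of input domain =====

-- B builds the tiles back-to-front (boundary tile first, then starts descending by stride,
-- reversed at the end) instead of an ascending range list with a conditional append; same cost.

-- ===== PORT A =====
def tile_coords_py (length : Int) (tile_size : Int) (overlap : Int) : List (Int × Int) :=
  let stride := tile_size - overlap
  if stride ≤ 0 then []  -- Python raises ValueError here; excluded by Pre_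
  else if length ≤ tile_size then [(0, tile_size)]
  else
    let coords := PySem.List.pyRange 0 (length - tile_size + 1) stride
    let coords := if PySem.List.pyGet? coords (-1) ≠ some (length - tile_size)
                  then coords ++ [length - tile_size] else coords
    coords.map (fun start => (start, start + tile_size))

-- ===== PORT B =====
-- B's descending while-loop: append (start, start + tile_size) while start ≥ 0, stepping down
-- by stride; the 0 < stride proof argument only ensures termination.
def tile_alt_loop (tile_size stride start : Int)
    (acc : List (Int × Int)) : List (Int × Int) :=
  if _h : 0 ≤ start ∧ 0 < stride then  -- 0 < stride holds at every call site; it only makes the loop total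
    tile_alt_loop tile_size stride (start - stride) (acc ++ [(start, start + tile_size)])
  else acc
termination_by (start + 1).toNat
decreasing_by omega

def tile_coords_py_alt (length : Int) (tile_size : Int) (overlap : Int) : List (Int × Int) :=
  let stride := tile_size - overlap
  if stride ≤ 0 then []  -- Python raises ValueError here; excluded by Pre_
  else if length ≤ tile_size then [(0, tile_size)]
  else
    let start := PySem.Int.floordiv (length - tile_size - 1) stride * stride
    (tile_alt_loop tile_size stride start [(length - tile_size, length)]).reverse

-- ===== PRECONDITION & SPEC =====
-- Pre_ excludes exactly the inputs where A raises ValueError (stride = tile_size - overlap ≤ 0).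
def Pre_tile_coords_py (length : Int) (tile_size : Int) (overlap : Int) : Prop :=
  0 < tile_size - overlap
instance (length : Int) (tile_size : Int) (overlap : Int) : Decidable (Pre_tile_coords_py length tile_size overlap) := by unfold Pre_tile_coords_py; infer_instance

def pvWitness_tile_coords_py : Int × Int × Int := (10, 4, 1)

def Spec_tile_coords_py (length : Int) (tile_size : Int) (overlap : Int) (out : List (Int × Int)) : Prop := out = tile_coords_py_alt length tile_size overlap
instance (length : Int) (tile_size : Int) (overlap : Int) (out : List (Int × Int)) : Decidable (Spec_tile_coords_py length tile_size overlap out) := by unfold Spec_tile_coords_py; infer_instance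

-- ===== CLAIM (what is proved, stated in full; the proofs are below) =====
def Claim_equal_tile_coords_py : Prop := ∀ (length : Int) (tile_size : Int) (overlap : Int), Dom_tile_coords_py length tile_size overlap → Pre_tile_coords_py length tile_size overlap → Spec_tile_coords_py length tile_size overlap (tile_coords_py length tile_size overlap)

-- ===== LEMMAS AND PROOFS =====

-- For 0 < s and 0 < d, A's range(0, d+1, s) is the starts 0, s, …, (d//s)·s.
theorem pyRange_starts (d s : Int) (hs : 0 < s) (hd : 0 < d) :
    PySem.List.pyRange 0 (d + 1) s
      = (List.range (d / s).toNat.succ).map (fun (k : Nat) => s * (k : Int)) := by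
  rw [PySem.List.pyRange_of_pos 0 (d + 1) hs]
  have hlt : (0 : Int) < d + 1 := by omega
  have hdiv : (d + 1 - 0 + s - 1) / s = d / s + 1 := by
    have : d + 1 - 0 + s - 1 = d + 1 * s := by ring
    rw [this, Int.add_mul_ediv_right d 1 (by omega)]
  have hq : 0 ≤ d / s := Int.ediv_nonneg (by omega) (by omega)
  simp only [if_pos hlt, hdiv]
  have : (d / s + 1).toNat = (d / s).toNat.succ := by omega
  rw [this]
  exact List.map_congr_left (fun k _ => by ring)

-- B's descending loop from start = s·j produces acc followed by the starts j·s, (j-1)·s, …, 0.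
theorem tile_alt_loop_char (T s : Int) (hs : 0 < s) (j : Nat) (acc : List (Int × Int)) :
    tile_alt_loop T s (s * (j : Int)) acc
      = acc ++ (List.range (j + 1)).reverse.map (fun (k : Nat) => (s * (k : Int), s * (k : Int) + T)) := by
  induction j generalizing acc with
  | zero =>
    rw [tile_alt_loop, dif_pos ⟨by omega, hs⟩]
    rw [tile_alt_loop, dif_neg (fun hc => by omega)]
    simp
  | succ n ih =>
    rw [tile_alt_loop, dif_pos ⟨by positivity, hs⟩]
    have harg : s * ((n + 1 : Nat) : Int) - s = s * ((n : Nat) : Int) := by push_cast; ring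
    rw [harg, ih]
    rw [List.range_succ (n := n + 1), List.reverse_append, List.map_append]
    simp

theorem main_equiv : ∀ (length : Int) (tile_size : Int) (overlap : Int),
    Pre_tile_coords_py length tile_size overlap →
    tile_coords_py length tile_size overlap = tile_coords_py_alt length tile_size overlap := by
  intro L T O hpre
  unfold Pre_tile_coords_py at hpre
  unfold tile_coords_py tile_coords_py_alt
  simp only [if_neg (by omega : ¬ T - O ≤ 0)]
  by_cases hle : L ≤ T
  · simp [hle]
  · simp only [if_neg hle]
    set s := T - O with hs
    set d := L - T with hd
    have hspos : 0 < s := hpre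
    have hdpos : 0 < d := by omega
    set q := d / s with hq
    have hq0 : 0 ≤ q := Int.ediv_nonneg (by omega) (by omega)
    have hmod : s * q + d % s = d := Int.mul_ediv_add_emod d s
    have hr0 : 0 ≤ d % s := Int.emod_nonneg d (by omega)
    have hrs : d % s < s := Int.emod_lt_of_pos d hspos
    have hrange := pyRange_starts d s hspos hdpos
    have hfd : PySem.Int.floordiv (d - 1) s = (d - 1) / s :=
      PySem.Int.floordiv_eq_ediv_of_pos hspos
    -- the last element of A's range list is s * q
    have hlast : PySem.List.pyGet? (PySem.List.pyRange 0 (d + 1) s) (-1) = some (s * q) := by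
      rw [hrange, PySem.List.pyGet?_neg_one, List.range_succ, List.map_append]
      simp
      exact Or.inl (by rw [← hq]; omega)
    by_cases hdvd : d % s = 0
    · -- divisible: A's last start is exactly d (no append); B descends from s·(q-1).
      have hsq : s * q = d := by omega
      have hq1 : 1 ≤ q := by nlinarith
      have hp : (d - 1) / s = q - 1 := by
        have : d - 1 = (s - 1) + s * (q - 1) := by linarith [hsq]
        rw [this, Int.add_mul_ediv_left _ _ (by omega : s ≠ 0),
          Int.ediv_eq_zero_of_lt (by omega) (by omega)]; ring
      have hstart : (d - 1) / s * s = s * ((q - 1).toNat : Int) := by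
        rw [hp]; have : ((q - 1).toNat : Int) = q - 1 := by omega
        rw [this]; ring
      rw [hlast]
      simp only [hsq, ne_eq, not_true_eq_false, if_false]
      rw [hfd, hstart, tile_alt_loop_char T s hspos (q - 1).toNat]
      rw [List.reverse_append, List.map_reverse, List.reverse_reverse, List.reverse_singleton]
      rw [hrange, List.map_map]
      have hn : (q - 1).toNat + 1 = q.toNat := by omega
      have hqcast : ((q.toNat : Nat) : Int) = q := by omega
      rw [hn]
      conv_lhs => rw [show q.toNat.succ = q.toNat + 1 from rfl, List.range_succ,
        List.map_append]
      simp only [List.map_cons, List.map_nil, Function.comp_apply, hqcast, hsq]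
      congr 1
      simp [hd]
    · -- not divisible: A appends d; B descends from s·q, the boundary tile is separate.
      have hne : s * q ≠ d := by omega
      have hp : (d - 1) / s = q := by
        have : d - 1 = (d % s - 1) + s * q := by omega
        rw [this, Int.add_mul_ediv_left _ _ (by omega : s ≠ 0),
          Int.ediv_eq_zero_of_lt (by omega) (by omega)]; ring
      have hstart : (d - 1) / s * s = s * ((q.toNat : Nat) : Int) := by
        rw [hp]; have : ((q.toNat : Nat) : Int) = q := by omega
        rw [this]; ring
      rw [hlast]
      simp only [ne_eq, Option.some.injEq, hne, not_false_eq_true, if_true]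
      rw [hfd, hstart, tile_alt_loop_char T s hspos q.toNat]
      rw [List.reverse_append, List.map_reverse, List.reverse_reverse, List.reverse_singleton]
      rw [hrange, List.map_append, List.map_map]
      have hn : q.toNat + 1 = q.toNat.succ := rfl
      rw [hn]
      congr 1
      simp [hd]

-- ===== VERDICT (by name: the statement is the Claim_ definition above) =====
theorem tile_coords_py_spec : Claim_equal_tile_coords_py := by
  intro L T O _ hpre
  unfold Spec_tile_coords_py
  exact main_equiv L T O hpre
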